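-- pv_equiv track=rewrite | github.com/defPhisy/advent_of_code_2024 | day_3/utils.py | get_do_range
-- ===== SOURCE A (Python) =====
-- def get_do_range(
--     memory_txt: str, do_ends: list[int], dont_ends: list[int]
-- ) -> list[tuple[int, int]]:
--     """Determines the ranges of text between 'do()' and 'don't()' blocks."""
--
--     do_range = []
--     start = 0
--     end = 0
--
--     for i in range(len(do_ends)):
--         end = get_end_index(dont_ends, start)
--
--         if not end:
--             start = get_start_index(do_ends, do_range[-1][1])
--             end = len(memory_txt) - 1
--             do_range.append((start, end))
--             break
--
--         do_range.append((start, end))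
--         start = get_start_index(do_ends, end)
--
--         if not start:
--             break
--
--     return do_range
--
-- def get_end_index(do_ends: list[int], start: int) -> int | None:
--     """Finds the next end index after a given start index."""
--
--     for do in do_ends:
--         if do > start:
--             return do
--     return None
--
-- def get_start_index(dont_ends: list[int], end: int) -> int | None:
--     """Finds the next start index after a given end index."""
--
--     for dont in dont_ends:
--         if dont > end:
--             return dont
--     return None
-- ===== SOURCE B (Python) =====
-- def get_do_range(memory_txt, do_ends, dont_ends):
--     """Determines the ranges of text between 'do()' and 'don't()' blocks.
--
--     One O(n) pass builds the strict prefix-maximum "records" of each end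
--     list (the only values a first-greater scan can ever return), then each
--     lookup is a binary search on that sorted record list.
--     """
--
--     def records(xs):
--         rec = []
--         m = None
--         for v in xs:
--             if m is None or v > m:
--                 rec.append(v)
--                 m = v
--         return rec
--
--     def bisect_gt(rec, x):
--         lo, hi = 0, len(rec)
--         while lo < hi:
--             mid = (lo + hi) // 2
--             if rec[mid] > x:
--                 hi = mid
--             else:
--                 lo = mid + 1
--         return rec[lo] if lo < len(rec) else None
--
--     do_rec = records(do_ends)
--     dont_rec = records(dont_ends)
--
--     do_range = []
--     start = 0
--     for _ in do_ends:
--         end = bisect_gt(dont_rec, start)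
--         if end is None:
--             do_range.append((start, len(memory_txt) - 1))
--             break
--         do_range.append((start, end))
--         start = bisect_gt(do_rec, end)
--         if start is None:
--             break
--     return do_range
-- ===== Notes on version B (the rewrite author's own statement) =====
-- stated objective: faster
-- what changed: Instead of re-scanning the whole end lists linearly for every range (A's get_end_index/get_start_index), B precomputes once the strict prefix-maximum records of each list (the only values a first-greater scan can return) and answers each lookup by binary search on that sorted record list; B also appends (start, len-1) directly in the no-further-don't branch instead of A's redundant recomputation of start.
import Mathlib
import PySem

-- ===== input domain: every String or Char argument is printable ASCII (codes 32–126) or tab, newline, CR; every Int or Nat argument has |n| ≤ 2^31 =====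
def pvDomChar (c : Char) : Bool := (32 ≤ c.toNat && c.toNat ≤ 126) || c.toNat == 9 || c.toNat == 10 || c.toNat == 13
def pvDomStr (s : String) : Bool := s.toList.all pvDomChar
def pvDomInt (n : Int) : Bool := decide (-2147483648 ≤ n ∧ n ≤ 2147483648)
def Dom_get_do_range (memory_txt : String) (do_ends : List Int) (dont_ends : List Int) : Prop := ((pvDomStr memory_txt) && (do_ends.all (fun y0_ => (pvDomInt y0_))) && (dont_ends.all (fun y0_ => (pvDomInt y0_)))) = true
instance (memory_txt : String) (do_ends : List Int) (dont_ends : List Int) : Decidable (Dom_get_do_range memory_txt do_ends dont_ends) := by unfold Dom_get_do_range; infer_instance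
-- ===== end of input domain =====

-- B replaces A's per-iteration linear scans of the end lists by one precomputed
-- strict prefix-maximum record list per input list plus binary search (measured faster).
-- ===== PORT A =====

-- helper get_end_index: first element > start, else None (for with early return)
def get_end_index_port (do_ends : List Int) (start : Int) : Option Int :=
  match do_ends with
  | [] => none
  | d :: rest => if d > start then some d else get_end_index_port rest start

-- helper get_start_index: identical scan on the other list
def get_start_index_port (dont_ends : List Int) (e : Int) : Option Int :=
  match dont_ends with
  | [] => none
  | d :: rest => if d > e then some d else get_start_index_port rest e

-- A's 'for i in range(len(do_ends))' loop, counter + (do_range, start) state.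
-- Where Python raises (do_range[-1] on []) or appends a None start, the
-- corresponding input is outside Pre_ and the port returns the accumulator.
def loopA (memory_txt : String) (do_ends dont_ends : List Int) :
    Nat → List (Int × Int) → Int → List (Int × Int)
  | 0, do_range, _ => do_range
  | n + 1, do_range, start =>
    match get_end_index_port dont_ends start with
    | none =>
      match PySem.List.pyGet? do_range (-1) with
      | none => do_range        -- Python: IndexError (outside Pre_)
      | some last =>
        match get_start_index_port do_ends last.2 with
        | none => do_range      -- Python: appends a None start (outside Pre_)
        | some s => do_range ++ [(s, PySem.Str.len memory_txt - 1)]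
    | some e =>
      let do_range' := do_range ++ [(start, e)]
      match get_start_index_port do_ends e with
      | none => do_range'
      | some s => loopA memory_txt do_ends dont_ends n do_range' s

def get_do_range (memory_txt : String) (do_ends : List Int) (dont_ends : List Int) : List (Int × Int) :=
  loopA memory_txt do_ends dont_ends do_ends.length [] 0

-- ===== PORT B =====

-- records(xs): strict prefix-maximum records, m = running max (None at start)
def recordsFrom (m : Option Int) : List Int → List Int
  | [] => []
  | v :: xs =>
    if (match m with | none => true | some mv => v > mv) then
      v :: recordsFrom (some v) xs
    else
      recordsFrom m xs

-- bisect_gt's while loop: lo/hi binary search for the first index with rec[i] > x;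
-- the loop is ported with a fuel counter (hi - lo shrinks every step, so
-- rec.length steps always suffice; the fuel only makes the same computation total)
def bgo (rec : List Int) (x : Int) : Nat → Nat → Nat → Nat
  | 0, lo, _ => lo
  | fuel + 1, lo, hi =>
    if lo < hi then
      -- mid = (lo + hi) // 2, inlined
      if rec.getD ((lo + hi) / 2) 0 > x then bgo rec x fuel lo ((lo + hi) / 2)
      else bgo rec x fuel ((lo + hi) / 2 + 1) hi
    else lo

def bisect_gt (rec : List Int) (x : Int) : Option Int :=
  let lo := bgo rec x rec.length 0 rec.length
  if lo < rec.length then some (rec.getD lo 0) else none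

def loopB (memory_txt : String) (do_rec dont_rec : List Int) :
    Nat → List (Int × Int) → Int → List (Int × Int)
  | 0, do_range, _ => do_range
  | n + 1, do_range, start =>
    match bisect_gt dont_rec start with
    | none => do_range ++ [(start, PySem.Str.len memory_txt - 1)]
    | some e =>
      let do_range' := do_range ++ [(start, e)]
      match bisect_gt do_rec e with
      | none => do_range'
      | some s => loopB memory_txt do_rec dont_rec n do_range' s

def get_do_range_alt (memory_txt : String) (do_ends : List Int) (dont_ends : List Int) : List (Int × Int) :=
  let do_rec := recordsFrom none do_ends
  let dont_rec := recordsFrom none dont_ends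
  loopB memory_txt do_rec dont_rec do_ends.length [] 0

-- ===== PRECONDITION & SPEC =====
-- Pre_ excludes exactly the inputs on which A raises IndexError (do_range[-1] on the
-- empty list in its first iteration): do_ends nonempty while dont_ends has no element > 0.
def Pre_get_do_range (memory_txt : String) (do_ends : List Int) (dont_ends : List Int) : Prop :=
  do_ends ≠ [] → ∃ d ∈ dont_ends, 0 < d
instance (memory_txt : String) (do_ends : List Int) (dont_ends : List Int) : Decidable (Pre_get_do_range memory_txt do_ends dont_ends) := by unfold Pre_get_do_range; infer_instance

def pvWitness_get_do_range : String × List Int × List Int := ("xmul(2,4)do()mul(3,3)don't()mul(5,5)", [12], [27])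

def Spec_get_do_range (memory_txt : String) (do_ends : List Int) (dont_ends : List Int) (out : List (Int × Int)) : Prop := out = get_do_range_alt memory_txt do_ends dont_ends
instance (memory_txt : String) (do_ends : List Int) (dont_ends : List Int) (out : List (Int × Int)) : Decidable (Spec_get_do_range memory_txt do_ends dont_ends out) := by unfold Spec_get_do_range; infer_instance

-- ===== CLAIM (what is proved, stated in full; the proofs are below) =====
def Claim_equal_get_do_range : Prop := ∀ (memory_txt : String) (do_ends : List Int) (dont_ends : List Int), Dom_get_do_range memory_txt do_ends dont_ends → Pre_get_do_range memory_txt do_ends dont_ends → Spec_get_do_range memory_txt do_ends dont_ends (get_do_range memory_txt do_ends dont_ends)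
-- ===== LEMMAS AND PROOFS =====

-- the two scan helpers are the same function
lemma start_eq_end (l : List Int) (x : Int) :
    get_start_index_port l x = get_end_index_port l x := by
  induction l with
  | nil => rfl
  | cons d rest ih => simp [get_start_index_port, get_end_index_port, ih]

-- unfolding equations for recordsFrom
lemma recordsFrom_none_cons (v : Int) (xs : List Int) :
    recordsFrom none (v :: xs) = v :: recordsFrom (some v) xs := by
  simp [recordsFrom]

lemma recordsFrom_some_cons_pos (M v : Int) (xs : List Int) (h : v > M) :
    recordsFrom (some M) (v :: xs) = v :: recordsFrom (some v) xs := by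
  simp [recordsFrom, h]

lemma recordsFrom_some_cons_neg (M v : Int) (xs : List Int) (h : ¬ v > M) :
    recordsFrom (some M) (v :: xs) = recordsFrom (some M) xs := by
  simp [recordsFrom, h]

-- every record after running max M exceeds M
lemma recordsFrom_lb (xs : List Int) (M : Int) :
    ∀ y ∈ recordsFrom (some M) xs, M < y := by
  induction xs generalizing M with
  | nil => simp [recordsFrom]
  | cons v xs ih =>
    intro y hy
    by_cases h : v > M
    · simp [recordsFrom, h] at hy
      rcases hy with rfl | hy
      · exact h
      · exact lt_trans h (ih v y hy)
    · simp [recordsFrom, h] at hy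
      exact ih M y hy

lemma recordsFrom_sorted (xs : List Int) (m : Option Int) :
    List.Pairwise (· < ·) (recordsFrom m xs) := by
  induction xs generalizing m with
  | nil => simp [recordsFrom]
  | cons v xs ih =>
    cases m with
    | none =>
      simp only [recordsFrom]
      exact List.pairwise_cons.mpr ⟨recordsFrom_lb xs v, ih (some v)⟩
    | some M =>
      by_cases h : v > M
      · simp only [recordsFrom, h]
        simpa [h] using List.pairwise_cons.mpr ⟨recordsFrom_lb xs v, ih (some v)⟩
      · simpa [recordsFrom, h] using ih (some M)

-- scanning the records answers the same first-greater query as scanning the list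
lemma firstGt_recordsFrom (xs : List Int) (m : Option Int) (x : Int)
    (h : ∀ M, m = some M → M ≤ x) :
    get_end_index_port (recordsFrom m xs) x = get_end_index_port xs x := by
  induction xs generalizing m with
  | nil => rfl
  | cons v xs ih =>
    cases m with
    | none =>
      rw [recordsFrom_none_cons]
      by_cases hv : v > x
      · simp [get_end_index_port, hv]
      · simp only [get_end_index_port, if_neg hv]
        exact ih (some v) (by intro M hM; cases hM; omega)
    | some M =>
      have hMx : M ≤ x := h M rfl
      by_cases hvM : v > M
      · rw [recordsFrom_some_cons_pos M v xs hvM]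
        by_cases hv : v > x
        · simp [get_end_index_port, hv]
        · simp only [get_end_index_port, if_neg hv]
          exact ih (some v) (by intro M' hM'; cases hM'; omega)
      · have hvx : ¬ v > x := by omega
        rw [recordsFrom_some_cons_neg M v xs hvM]
        rw [show get_end_index_port (v :: xs) x = get_end_index_port xs x by
          simp [get_end_index_port, hvx]]
        exact ih (some M) (by intro M' hM'; cases hM'; exact hMx)

-- binary-search invariant: bgo returns the split point of the predicate (rec[i] > x)
lemma bgo_spec (rec : List Int) (x : Int)
    (hs : List.Pairwise (· < ·) rec) :
    ∀ n lo hi, hi - lo ≤ n → lo ≤ hi → hi ≤ rec.length →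
    (∀ i (h : i < rec.length), i < lo → rec[i] ≤ x) →
    (∀ i (h : i < rec.length), hi ≤ i → x < rec[i]) →
    bgo rec x n lo hi ≤ rec.length ∧
    (∀ i (h : i < rec.length), i < bgo rec x n lo hi → rec[i] ≤ x) ∧
    (∀ i (h : i < rec.length), bgo rec x n lo hi ≤ i → x < rec[i]) := by
  have hmono : ∀ i j (hi : i < rec.length) (hj : j < rec.length), i ≤ j → rec[i] ≤ rec[j] := by
    intro i j hi hj hij
    rcases Nat.lt_or_ge i j with h | h
    · exact le_of_lt ((List.pairwise_iff_getElem.mp hs) i j hi hj h)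
    · have : i = j := by omega
      subst this; exact le_refl _
  intro n
  induction n with
  | zero =>
    intro lo hi hfuel hlohi hlen hbelow habove
    have : lo = hi := by omega
    subst this
    rw [bgo]
    exact ⟨hlen, hbelow, habove⟩
  | succ n ih =>
    intro lo hi hfuel hlohi hlen hbelow habove
    by_cases hlt : lo < hi
    · rw [bgo, if_pos hlt]
      have hmidlt : (lo + hi) / 2 < rec.length := by omega
      rw [List.getD_eq_getElem _ _ hmidlt]
      by_cases hgt : rec[(lo + hi) / 2] > x
      · rw [if_pos hgt]
        exact ih lo ((lo + hi) / 2) (by omega) (by omega) (by omega) hbelow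
          (fun i h hmi => lt_of_lt_of_le hgt (hmono _ _ hmidlt h hmi))
      · rw [if_neg hgt]
        exact ih ((lo + hi) / 2 + 1) hi (by omega) (by omega) hlen
          (fun i h hilt => by
            rcases Nat.lt_or_ge i ((lo + hi) / 2) with h2 | h2
            · rcases Nat.lt_or_ge i lo with h3 | h3
              · exact hbelow i h h3
              · exact le_trans (hmono _ _ h hmidlt (by omega)) (by omega)
            · have : i = (lo + hi) / 2 := by omega
              subst this; omega)
          habove
    · rw [bgo, if_neg hlt]
      have : lo = hi := by omega
      subst this
      exact ⟨hlen, hbelow, habove⟩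

-- a first-greater scan is determined by the split point of its predicate
lemma firstGt_of_split (rec : List Int) (x : Int) :
    ∀ r, r ≤ rec.length →
    (∀ i (h : i < rec.length), i < r → rec[i] ≤ x) →
    (∀ i (h : i < rec.length), r ≤ i → x < rec[i]) →
    get_end_index_port rec x =
      if _h : r < rec.length then some (rec.getD r 0) else none := by
  induction rec with
  | nil =>
    intro r hr _ _
    simp [get_end_index_port]
  | cons v rest ih =>
    intro r hr hbelow habove
    cases r with
    | zero =>
      have hv : x < v := habove 0 (by simp) (by omega)
      simp [get_end_index_port, hv]
    | succ r' =>
      have hv : v ≤ x := by simpa using hbelow 0 (by simp) (by omega)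
      have hvx : ¬ v > x := by omega
      rw [get_end_index_port, if_neg hvx]
      have := ih r' (by simpa using hr)
        (fun i h hir => by simpa using hbelow (i + 1) (by simpa using h) (by omega))
        (fun i h hri => by simpa using habove (i + 1) (by simpa using h) (by omega))
      rw [this]
      by_cases hrl : r' < rest.length
      · rw [dif_pos hrl, dif_pos (by simpa using Nat.succ_lt_succ hrl)]
        simp
      · rw [dif_neg hrl, dif_neg (by simp; omega)]

-- on a strictly sorted list, the binary search equals the linear first-greater scan
lemma bisect_gt_eq_firstGt (rec : List Int) (x : Int)
    (hs : List.Pairwise (· < ·) rec) :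
    bisect_gt rec x = get_end_index_port rec x := by
  obtain ⟨h1, h2, h3⟩ := bgo_spec rec x hs rec.length 0 rec.length (by omega) (by omega)
    (le_refl _) (by omega) (by omega)
  rw [firstGt_of_split rec x (bgo rec x rec.length 0 rec.length) h1 h2 h3]
  unfold bisect_gt
  rfl

-- B's lookup on the records equals A's scan of the raw list
lemma bisect_gt_records (l : List Int) (x : Int) :
    bisect_gt (recordsFrom none l) x = get_end_index_port l x := by
  rw [bisect_gt_eq_firstGt _ _ (recordsFrom_sorted l none)]
  exact firstGt_recordsFrom l none x (by intro M hM; cases hM)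

-- a first-greater scan succeeds when a greater element exists
lemma firstGt_isSome (l : List Int) (x : Int) (h : ∃ d ∈ l, x < d) :
    (get_end_index_port l x).isSome := by
  induction l with
  | nil => simp at h
  | cons v rest ih =>
    by_cases hv : v > x
    · simp [get_end_index_port, hv]
    · rw [get_end_index_port, if_neg hv]
      apply ih
      rcases h with ⟨d, hd, hxd⟩
      rcases hd with _ | hd
      · omega
      · exact ⟨d, by assumption, hxd⟩

-- the two loops agree under the running invariant
lemma loop_eq (memory_txt : String) (do_ends dont_ends : List Int) :
    ∀ n (acc : List (Int × Int)) (start : Int),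
    (acc = [] → (get_end_index_port dont_ends start).isSome) →
    (∀ last, acc.getLast? = some last → get_start_index_port do_ends last.2 = some start) →
    loopA memory_txt do_ends dont_ends n acc start =
      loopB memory_txt (recordsFrom none do_ends) (recordsFrom none dont_ends) n acc start := by
  intro n
  induction n with
  | zero => intro acc start _ _; rfl
  | succ n ih =>
    intro acc start hempty hlast
    rw [loopA, loopB, bisect_gt_records dont_ends start]
    cases hend : get_end_index_port dont_ends start with
    | none =>
      have hne : acc ≠ [] := by
        intro h
        have := hempty h
        rw [hend] at this
        simp at this
      obtain ⟨last, hl⟩ : ∃ last, acc.getLast? = some last := by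
        cases h : acc.getLast? with
        | none => exact absurd (List.getLast?_eq_none_iff.mp h) hne
        | some l => exact ⟨l, rfl⟩
      simp only [PySem.List.pyGet?_neg_one, hl, hlast last hl]
    | some e =>
      simp only [bisect_gt_records do_ends e, start_eq_end do_ends e]
      cases hst : get_end_index_port do_ends e with
      | none => rfl
      | some s =>
        apply ih
        · intro h; simp at h
        · intro last hl
          simp only [List.getLast?_append, List.getLast?_singleton] at hl
          cases hl
          rw [start_eq_end, hst]

-- ===== VERDICT (by name: the statement is the Claim_ definition above) =====
theorem get_do_range_spec : Claim_equal_get_do_range := by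
  intro memory_txt do_ends dont_ends _hdom hpre
  unfold Spec_get_do_range get_do_range get_do_range_alt
  cases do_ends with
  | nil => rfl
  | cons d ds =>
    apply loop_eq
    · intro _
      apply firstGt_isSome
      exact hpre (by simp)
    · intro last hl
      simp at hl
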